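-- pv_equiv track=rewrite | github.com/DrSleep/nas-segm-pytorch | src/rl/micro_controllers.py | action2config
-- ===== SOURCE A (Python) =====
-- def action2config(action, enc_end=0, dec_block=3, ctx_block=4):
--     ctx = []
--     for i in range(ctx_block):
--         if i == 0:
--             # the first layer has only input + op
--             ctx.append([action[i], action[i + 1]])
--         else:
--             # next layers have 2 inputs + 2 ops
--             ctx.append(
--                 [
--                     action[(i - 1) * 4 + 2],
--                     action[(i - 1) * 4 + 3],
--                     action[(i - 1) * 4 + 4],
--                     action[(i - 1) * 4 + 5],
--                 ]
--             )
--     conns = []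
--     for i in range(dec_block):
--         conns.append(
--             [
--                 action[4 * (ctx_block - 1) + 2 + i * 2],
--                 action[4 * (ctx_block - 1) + 2 + i * 2 + 1],
--             ]
--         )
--     return [ctx, conns]
-- ===== SOURCE B (Python) =====
-- def action2config(action, enc_end=0, dec_block=3, ctx_block=4):
--     # one uniform partition-by-sizes pass: a size table replaces the two loops
--     # and the hand-coded index arithmetic
--     sizes = [2 if i == 0 else 4 for i in range(ctx_block)] + [2] * dec_block
--     chunks = []
--     cursor = 0
--     for size in sizes:
--         chunks.append([action[cursor + j] for j in range(size)])
--         cursor += size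
--     return [chunks[:ctx_block], chunks[ctx_block:]]
-- ===== Notes on version B (the rewrite author's own statement) =====
-- stated objective: simpler
-- what changed: Replaces A's two accumulator loops with hand-coded per-chunk index arithmetic by a single uniform partition-by-sizes pass: a size table ([2,4,4,...] for ctx, then [2]*dec_block) is consumed with one running cursor, and the resulting chunk list is split at ctx_block.
-- outside the precondition, e.g. on action2config([1, 2, 3, 4], 0, 1, 0): A returns [[], [[3, 4]]], B returns [[], [[1, 2]]]
import Mathlib
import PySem

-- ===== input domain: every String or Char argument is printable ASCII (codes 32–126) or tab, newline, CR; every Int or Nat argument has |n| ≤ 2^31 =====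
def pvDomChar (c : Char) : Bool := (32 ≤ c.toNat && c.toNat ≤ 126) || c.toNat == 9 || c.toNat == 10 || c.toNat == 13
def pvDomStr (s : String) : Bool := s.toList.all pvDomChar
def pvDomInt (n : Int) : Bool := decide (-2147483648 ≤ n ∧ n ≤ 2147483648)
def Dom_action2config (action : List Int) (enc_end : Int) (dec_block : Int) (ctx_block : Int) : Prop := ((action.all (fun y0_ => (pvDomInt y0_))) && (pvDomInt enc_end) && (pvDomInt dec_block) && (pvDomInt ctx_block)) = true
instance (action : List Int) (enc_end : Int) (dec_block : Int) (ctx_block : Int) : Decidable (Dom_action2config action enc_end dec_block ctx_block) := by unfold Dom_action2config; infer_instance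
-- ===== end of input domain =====

-- B replaces A's two accumulator loops (with an i==0 special case and hand-coded index
-- arithmetic) by one uniform partition-by-sizes pass with a running cursor (objective:
-- simpler); Pre_ excludes ctx_block ≤ 0, where A's conns indices are negative and read
-- by Python's accidental wraparound, which B's cursor partition does not reproduce.


-- ===== PORT A =====
-- action[k] is ported as pyGetD (default 0); Pre_ below admits only inputs where every
-- read is in range, so the default is never the result.
def action2config (action : List Int) (enc_end : Int) (dec_block : Int) (ctx_block : Int) : List (List (List Int)) :=
  let ctx := (PySem.List.pyRange 0 ctx_block 1).foldl (fun ctx i =>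
    if i = 0 then
      ctx ++ [[PySem.List.pyGetD action i 0, PySem.List.pyGetD action (i + 1) 0]]
    else
      ctx ++ [[PySem.List.pyGetD action ((i - 1) * 4 + 2) 0,
               PySem.List.pyGetD action ((i - 1) * 4 + 3) 0,
               PySem.List.pyGetD action ((i - 1) * 4 + 4) 0,
               PySem.List.pyGetD action ((i - 1) * 4 + 5) 0]]) []
  let conns := (PySem.List.pyRange 0 dec_block 1).foldl (fun conns i =>
    conns ++ [[PySem.List.pyGetD action (4 * (ctx_block - 1) + 2 + i * 2) 0,
               PySem.List.pyGetD action (4 * (ctx_block - 1) + 2 + i * 2 + 1) 0]]) []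
  [ctx, conns]

-- ===== PORT B =====
-- '[x] * n' for possibly negative n is List.replicate n.toNat x (Python gives [] there)
def action2config_alt (action : List Int) (enc_end : Int) (dec_block : Int) (ctx_block : Int) : List (List (List Int)) :=
  let sizes : List Int :=
    (PySem.List.pyRange 0 ctx_block 1).map (fun i => if i = 0 then 2 else 4)
      ++ List.replicate dec_block.toNat 2
  let st := sizes.foldl (fun (st : List (List Int) × Int) size =>
      (st.1 ++ [(PySem.List.pyRange 0 size 1).map
                  (fun j => PySem.List.pyGetD action (st.2 + j) 0)],
       st.2 + size)) ([], 0)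
  [PySem.List.slice st.1 none (some ctx_block), PySem.List.slice st.1 (some ctx_block) none]

-- ===== PRECONDITION & SPEC =====
-- Pre_ excludes (besides short lists, on which A raises IndexError) the inputs with
-- ctx_block ≤ 0 with dec_block ≥ 1, on which A still returns whenever its negative conns
-- indices happen to resolve by Python's accidental wraparound; B's size-table partition
-- is not defined to mimic that.
def Pre_action2config (action : List Int) (enc_end : Int) (dec_block : Int) (ctx_block : Int) : Prop :=
  (1 ≤ ctx_block ∧ 4 * ctx_block - 2 + 2 * max dec_block 0 ≤ (action.length : Int))
  ∨ (ctx_block ≤ 0 ∧ dec_block ≤ 0)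
instance (action : List Int) (enc_end : Int) (dec_block : Int) (ctx_block : Int) : Decidable (Pre_action2config action enc_end dec_block ctx_block) := by unfold Pre_action2config; infer_instance
def pvWitness_action2config : List Int × Int × Int × Int := ([1, 2, 3, 4, 5, 6, 7, 8], 0, 1, 2)

def Spec_action2config (action : List Int) (enc_end : Int) (dec_block : Int) (ctx_block : Int) (out : List (List (List Int))) : Prop := out = action2config_alt action enc_end dec_block ctx_block
instance (action : List Int) (enc_end : Int) (dec_block : Int) (ctx_block : Int) (out : List (List (List Int))) : Decidable (Spec_action2config action enc_end dec_block ctx_block out) := by unfold Spec_action2config; infer_instance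

-- ===== CLAIM =====
def Claim_equal_action2config : Prop := ∀ (action : List Int) (enc_end : Int) (dec_block : Int) (ctx_block : Int), Dom_action2config action enc_end dec_block ctx_block → Pre_action2config action enc_end dec_block ctx_block → Spec_action2config action enc_end dec_block ctx_block (action2config action enc_end dec_block ctx_block)

-- ===== LEMMAS AND PROOFS =====

-- the chunk of `size` consecutive reads starting at cursor c
def a2cChunk (action : List Int) (c size : Int) : List Int :=
  (PySem.List.pyRange 0 size 1).map (fun j => PySem.List.pyGetD action (c + j) 0)

-- the chunk list B's fold produces from a size table, with its cursor recursion
def a2cChunks (action : List Int) : List Int → Int → List (List Int)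
  | [], _ => []
  | s :: rest, c => a2cChunk action c s :: a2cChunks action rest (c + s)

theorem a2c_fold_eq_chunks (action : List Int) (sizes : List Int) :
    ∀ (acc : List (List Int)) (c : Int),
      (sizes.foldl (fun (st : List (List Int) × Int) size =>
          (st.1 ++ [(PySem.List.pyRange 0 size 1).map
                      (fun j => PySem.List.pyGetD action (st.2 + j) 0)],
           st.2 + size)) (acc, c))
        = (acc ++ a2cChunks action sizes c, c + sizes.sum) := by
  induction sizes with
  | nil => intro acc c; simp [a2cChunks]
  | cons s rest ih =>
      intro acc c
      simp only [List.foldl_cons, ih, a2cChunks, a2cChunk, List.sum_cons, Prod.mk.injEq]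
      exact ⟨by simp, by ring⟩

theorem a2cChunks_append (action : List Int) (l1 l2 : List Int) (c : Int) :
    a2cChunks action (l1 ++ l2) c = a2cChunks action l1 c ++ a2cChunks action l2 (c + l1.sum) := by
  induction l1 generalizing c with
  | nil => simp [a2cChunks]
  | cons s rest ih => simp [a2cChunks, ih, add_assoc]

theorem a2cChunks_replicate (action : List Int) (s : Int) (n : Nat) :
    ∀ c : Int, a2cChunks action (List.replicate n s) c
      = (List.range n).map (fun k : Nat => a2cChunk action (c + s * (k:Int)) s) := by
  induction n with
  | zero => intro c; simp [a2cChunks]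
  | succ n ih =>
      intro c
      rw [List.replicate_succ]
      simp only [a2cChunks, ih, List.range_succ_eq_map, List.map_cons, List.map_map]
      refine congrArg₂ List.cons ?_ ?_
      · norm_num
      · apply List.map_congr_left; intro k _
        simp only [Function.comp_apply, Nat.succ_eq_add_one]
        congr 1
        push_cast
        ring

theorem a2c_pyRange_two (a b : Int) (h : b = a + 2) :
    PySem.List.pyRange a b 1 = [a, a + 1] := by
  subst h
  rw [PySem.List.pyRange_one, show a + 2 - a = (2:Int) by ring,
    show (2:Int).toNat = 2 from rfl]
  norm_num [List.range_succ]

theorem a2c_pyRange_four (a b : Int) (h : b = a + 4) :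
    PySem.List.pyRange a b 1 = [a, a + 1, a + 2, a + 3] := by
  subst h
  rw [PySem.List.pyRange_one, show a + 4 - a = (4:Int) by ring,
    show (4:Int).toNat = 4 from rfl]
  norm_num [List.range_succ]

theorem a2cChunk_two (action : List Int) (c : Int) :
    a2cChunk action c 2 = [PySem.List.pyGetD action c 0, PySem.List.pyGetD action (c + 1) 0] := by
  unfold a2cChunk
  rw [a2c_pyRange_two 0 2 (by ring)]
  simp

theorem a2cChunk_four (action : List Int) (c : Int) :
    a2cChunk action c 4 = [PySem.List.pyGetD action c 0, PySem.List.pyGetD action (c + 1) 0,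
      PySem.List.pyGetD action (c + 2) 0, PySem.List.pyGetD action (c + 3) 0] := by
  unfold a2cChunk
  rw [a2c_pyRange_four 0 4 (by ring)]
  simp

-- A = B whenever ctx_block ≥ 1 (no read is negative then; the length bound of Pre_
-- only matters for faithfulness of the ports to the Pythons, not for this equality)
theorem a2c_ports_eq (action : List Int) (enc_end dec_block ctx_block : Int)
    (hcb : 1 ≤ ctx_block) :
    action2config action enc_end dec_block ctx_block
      = action2config_alt action enc_end dec_block ctx_block := by
  have gc : ∀ x y : Int, x = y → PySem.List.pyGetD action x 0 = PySem.List.pyGetD action y 0 :=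
    fun x y h => by rw [h]
  obtain ⟨n, hn⟩ : ∃ n : Nat, (n:Int) = ctx_block - 1 :=
    ⟨(ctx_block - 1).toNat, Int.toNat_of_nonneg (by omega)⟩
  have h1 : (ctx_block - 1).toNat = n := by omega
  simp only [action2config, action2config_alt]
  have hsz : (PySem.List.pyRange 0 ctx_block 1).map (fun i => if i = 0 then (2:Int) else 4)
      = 2 :: List.replicate n 4 := by
    rw [PySem.List.pyRange_one, show (ctx_block - 0).toNat = n + 1 from by omega,
      List.range_succ_eq_map]
    simp only [List.map_cons, List.map_map]
    refine congrArg₂ List.cons (by norm_num) ?_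
    refine Eq.trans (List.map_congr_left ?_) (?_ : (List.range n).map (fun _ : Nat => (4:Int)) = _)
    · intro k _
      simp only [Function.comp_apply]
      rw [if_neg (by push_cast; omega)]
    · simp [List.map_const']
  rw [hsz, a2c_fold_eq_chunks]
  simp only [List.nil_append]
  rw [a2cChunks_append]
  simp only [a2cChunks]
  rw [a2cChunks_replicate, a2cChunks_replicate]
  simp only [List.sum_cons, List.sum_replicate, nsmul_eq_mul, zero_add, add_zero,
    List.cons_append]
  rw [PySem.List.slice_to _ (by omega : (0:Int) ≤ ctx_block),
      PySem.List.slice_from _ (by omega : (0:Int) ≤ ctx_block)]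
  have hcbn : ctx_block.toNat = n + 1 := by omega
  have hlen : ((List.range n).map (fun k : Nat => a2cChunk action (2 + 4 * (k:Int)) 4)).length = n := by
    simp
  rw [hcbn]
  refine congrArg₂ (fun u v => [u, v]) ?_ ?_
  · -- ctx: A's fold with the i = 0 branch equals the first ctx_block chunks
    refine Eq.trans (PySem.List.foldl_congr_mem _ _
        (fun acc i =>
          acc ++ [if i = 0 then
              [PySem.List.pyGetD action i 0, PySem.List.pyGetD action (i + 1) 0]
            else
              [PySem.List.pyGetD action ((i - 1) * 4 + 2) 0,
               PySem.List.pyGetD action ((i - 1) * 4 + 3) 0,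
               PySem.List.pyGetD action ((i - 1) * 4 + 4) 0,
               PySem.List.pyGetD action ((i - 1) * 4 + 5) 0]]) []
        (by intro acc i _; by_cases h : i = 0 <;> simp [h])) ?_
    rw [PySem.List.foldl_append_singleton_eq_map, List.nil_append]
    rw [PySem.List.pyRange_one]
    have hr : (ctx_block - 0).toNat = n + 1 := by omega
    rw [hr, List.range_succ_eq_map]
    simp only [List.map_cons, List.map_map]
    rw [List.take_succ_cons, List.take_left' hlen]
    refine congrArg₂ List.cons ?_ ?_
    · norm_num [a2cChunk_two]
    · apply List.map_congr_left
      intro k _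
      have hk1 : ((0:Int) + ((Nat.succ k : Nat) : Int)) = (k:Int) + 1 := by push_cast; ring
      simp only [Function.comp_apply, hk1]
      rw [if_neg (by omega), a2cChunk_four]
      simp only [List.cons.injEq, and_true]
      exact ⟨gc _ _ (by ring), gc _ _ (by ring), gc _ _ (by ring), gc _ _ (by ring)⟩
  · -- conns: A's second fold equals the remaining dec_block chunks
    rw [PySem.List.foldl_append_singleton_eq_map, List.nil_append]
    rw [List.drop_succ_cons, List.drop_left' hlen]
    rw [PySem.List.pyRange_one, List.map_map,
      show (dec_block - 0).toNat = dec_block.toNat from by omega]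
    apply List.map_congr_left
    intro k _
    simp only [Function.comp_apply]
    rw [a2cChunk_two]
    simp only [List.cons.injEq, and_true]
    exact ⟨gc _ _ (by push_cast [hn]; ring), gc _ _ (by push_cast [hn]; ring)⟩

-- both block counts ≤ 0: A's two loops run zero times and B's size table is empty
theorem a2c_ports_eq_degenerate (action : List Int) (enc_end dec_block ctx_block : Int)
    (hcb : ctx_block ≤ 0) (hdb : dec_block ≤ 0) :
    action2config action enc_end dec_block ctx_block
      = action2config_alt action enc_end dec_block ctx_block := by
  simp only [action2config, action2config_alt]
  rw [PySem.List.pyRange_one_eq_nil hcb, PySem.List.pyRange_one_eq_nil hdb,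
    show dec_block.toNat = 0 from by omega]
  simp [PySem.List.slice]

-- ===== VERDICT =====
theorem action2config_spec : Claim_equal_action2config := by
  intro action enc_end dec_block ctx_block _ hpre
  rcases hpre with ⟨h1, _⟩ | ⟨h1, h2⟩
  · exact a2c_ports_eq action enc_end dec_block ctx_block h1
  · exact a2c_ports_eq_degenerate action enc_end dec_block ctx_block h1 h2
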